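-- pv_equiv track=rewrite | github.com/suzmue/quesadilla | generate/strategy.py | get_splits
-- ===== SOURCE A (Python) =====
-- def get_splits(permutation):
--     splits = []
--     current_split = []
--     last = 0
--     for i in range (0, len(permutation)):
--         current_split.append(permutation[i])
--         last = max(permutation[i], last)
--         if i == last:
--             splits.append(current_split.copy())
--             current_split = []
--     return splits
-- ===== SOURCE B (Python) =====
-- def get_splits(permutation):
--     # pass 1: collect cut points (indices equal to running max)
--     bounds = []
--     last = 0
--     for i, x in enumerate(permutation):
--         last = max(x, last)
--         if i == last:
--             bounds.append(i)
--     # pass 2: slice between consecutive cut points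
--     splits = []
--     prev = -1
--     for b in bounds:
--         splits.append(permutation[prev + 1:b + 1])
--         prev = b
--     return splits
-- ===== Notes on version B (the rewrite author's own statement) =====
-- stated objective: alternative
-- what changed: B replaces A's fused single pass that accumulates the current block element-by-element with two passes: first collect only the cut-point indices where the index equals the running max, then build the result by slicing the permutation between consecutive cut points.
import Mathlib
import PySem

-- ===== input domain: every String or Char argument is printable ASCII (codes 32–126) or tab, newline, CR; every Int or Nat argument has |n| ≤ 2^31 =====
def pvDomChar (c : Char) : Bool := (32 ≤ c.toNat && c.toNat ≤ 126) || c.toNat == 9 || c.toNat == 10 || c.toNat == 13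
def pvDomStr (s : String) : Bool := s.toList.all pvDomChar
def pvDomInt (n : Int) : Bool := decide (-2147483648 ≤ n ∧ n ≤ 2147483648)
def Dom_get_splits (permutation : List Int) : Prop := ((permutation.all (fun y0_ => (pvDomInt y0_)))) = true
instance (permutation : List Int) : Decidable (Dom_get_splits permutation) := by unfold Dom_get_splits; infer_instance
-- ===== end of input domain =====

-- B is an alternative two-pass decomposition (collect cut points, then slice); same O(n) cost,
-- equivalence of the RETURN value is proved (neither version mutates its argument).

-- ===== PORT A =====
-- loop body of A; permutation[i] is always in range in A's loop, so pyGetD's default is never used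
def pvAStep (permutation : List Int) (st : List (List Int) × List Int × Int) (i : Int) :
    List (List Int) × List Int × Int :=
  let current_split := st.2.1 ++ [PySem.List.pyGetD permutation i 0]
  let last := max (PySem.List.pyGetD permutation i 0) st.2.2
  if i = last then (st.1 ++ [current_split], [], last) else (st.1, current_split, last)

def get_splits (permutation : List Int) : List (List Int) :=
  ((PySem.List.pyRange 0 permutation.length 1).foldl (pvAStep permutation) ([], [], 0)).1

-- ===== PORT B =====
-- pass 1 body: record index i as a cut point when i equals the running max
def pvBoundStep (st : List Int × Int) (p : Int × Int) : List Int × Int :=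
  let last := max p.2 st.2
  if p.1 = last then (st.1 ++ [p.1], last) else (st.1, last)

-- pass 2 body: slice permutation[prev+1 : b+1]
def pvSliceStep (permutation : List Int) (acc : List (List Int) × Int) (b : Int) :
    List (List Int) × Int :=
  (acc.1 ++ [PySem.List.slice permutation (some (acc.2 + 1)) (some (b + 1))], b)

def get_splits_alt (permutation : List Int) : List (List Int) :=
  let bounds := ((PySem.List.enumerate permutation 0).foldl pvBoundStep ([], 0)).1
  (bounds.foldl (pvSliceStep permutation) ([], -1)).1

-- ===== PRECONDITION & SPEC =====
def Spec_get_splits (permutation : List Int) (out : List (List Int)) : Prop := out = get_splits_alt permutation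
instance (permutation : List Int) (out : List (List Int)) : Decidable (Spec_get_splits permutation out) := by unfold Spec_get_splits; infer_instance

-- ===== CLAIM (what is proved, stated in full; the proofs are below) =====
def Claim_equal_get_splits : Prop := ∀ (permutation : List Int), Dom_get_splits permutation → Spec_get_splits permutation (get_splits permutation)

-- ===== LEMMAS AND PROOFS =====

-- prefix states: A's fold and B's first fold after the first k indices
def pvA1 (p : List Int) (k : Nat) : List (List Int) × List Int × Int :=
  (PySem.List.pyRange 0 k 1).foldl (pvAStep p) ([], [], 0)

def pvB1 (p : List Int) (k : Nat) : List Int × Int :=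
  (PySem.List.pyRange 0 k 1).foldl (fun st (j : Int) => pvBoundStep st (j, PySem.List.pyGetD p j 0)) ([], 0)

def pvG (p : List Int) (bs : List Int) : List (List Int) × Int :=
  bs.foldl (pvSliceStep p) ([], -1)

lemma take_drop_succ (p : List Int) (j k : Nat) (hj : j ≤ k) (hk : k < p.length) :
    (p.drop j).take (k + 1 - j) = (p.drop j).take (k - j) ++ [p[k]] := by
  have hlen : k - j < (p.drop j).length := by simp [List.length_drop]; omega
  have h1 : k + 1 - j = (k - j) + 1 := by omega
  rw [h1, List.take_add_one, List.getElem?_eq_getElem hlen]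
  simp [List.getElem_drop]
  congr 1
  omega

lemma pvInv (p : List Int) (k : Nat) (hk : k ≤ p.length) :
    (pvA1 p k).2.2 = (pvB1 p k).2 ∧
    (pvA1 p k).1 = (pvG p (pvB1 p k).1).1 ∧
    ∃ j : Nat, j ≤ k ∧ (pvG p (pvB1 p k).1).2 = (j : Int) - 1 ∧
      (pvA1 p k).2.1 = (p.drop j).take (k - j) := by
  induction k with
  | zero =>
      refine ⟨rfl, rfl, 0, le_refl _, ?_, ?_⟩ <;> simp [pvA1, pvB1, pvG, PySem.List.pyRange]
  | succ k ih =>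
      have hk' : k < p.length := by omega
      obtain ⟨hL, hS, j, hj, hprev, hC⟩ := ih (by omega)
      have hx : PySem.List.pyGetD p (k : Int) 0 = p[k] := by
        rw [PySem.List.pyGetD_natCast]
        simp [List.getD, List.getElem?_eq_getElem hk']
      have hrange : PySem.List.pyRange 0 ((k : Int) + 1) 1 =
          PySem.List.pyRange 0 (k : Int) 1 ++ [(k : Int)] :=
        PySem.List.pyRange_one_succ_right (by positivity)
      have hA : pvA1 p (k + 1) = pvAStep p (pvA1 p k) (k : Int) := by
        simp [pvA1, hrange, List.foldl_append]
      have hB : pvB1 p (k + 1) = pvBoundStep (pvB1 p k) ((k : Int), PySem.List.pyGetD p (k : Int) 0) := by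
        simp [pvB1, hrange, List.foldl_append]
      by_cases hcut : (k : Int) = max (p[k]) (pvA1 p k).2.2
      · -- cut point: A closes the block, B records k
        have hAstep : pvA1 p (k + 1) =
            ((pvA1 p k).1 ++ [(pvA1 p k).2.1 ++ [p[k]]], [], max (p[k]) (pvA1 p k).2.2) := by
          rw [hA]; simp only [pvAStep, hx]; rw [if_pos hcut]
        have hBstep : pvB1 p (k + 1) = ((pvB1 p k).1 ++ [(k : Int)], max (p[k]) (pvA1 p k).2.2) := by
          rw [hB]; simp only [pvBoundStep, hx, ← hL]; rw [if_pos hcut]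
        have hGstep : pvG p ((pvB1 p k).1 ++ [(k : Int)]) =
            ((pvG p (pvB1 p k).1).1 ++
              [PySem.List.slice p (some ((pvG p (pvB1 p k).1).2 + 1)) (some ((k : Int) + 1))],
             (k : Int)) := by
          simp [pvG, List.foldl_append, pvSliceStep]
        refine ⟨by rw [hAstep, hBstep], ?_, k + 1, le_refl _, ?_, ?_⟩
        · rw [hAstep, hBstep]
          simp only [hGstep]
          rw [hS, hprev]
          congr 2
          have h1 : ((j : Int) - 1 + 1) = ((j : Nat) : Int) := by omega
          rw [h1]
          have h2 : ((k : Int) + 1) = (((k + 1 : Nat)) : Int) := by push_cast; omega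
          rw [h2, PySem.List.slice_natCast, hC, take_drop_succ p j k hj hk']
        · rw [hBstep]; simp only [hGstep]; push_cast; omega
        · rw [hAstep]; simp
      · -- no cut: A extends the current block, B only updates the running max
        have hAstep : pvA1 p (k + 1) =
            ((pvA1 p k).1, (pvA1 p k).2.1 ++ [p[k]], max (p[k]) (pvA1 p k).2.2) := by
          rw [hA]; simp only [pvAStep, hx]; rw [if_neg hcut]
        have hBstep : pvB1 p (k + 1) = ((pvB1 p k).1, max (p[k]) (pvA1 p k).2.2) := by
          rw [hB]; simp only [pvBoundStep, hx, ← hL]; rw [if_neg hcut]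
        refine ⟨by rw [hAstep, hBstep], by rw [hAstep, hBstep, hS], j, by omega, ?_, ?_⟩
        · rw [hBstep]; exact hprev
        · rw [hAstep]
          dsimp only
          rw [hC]
          exact (take_drop_succ p j k hj hk').symm

lemma pvB1_eq (p : List Int) :
    (PySem.List.enumerate p 0).foldl pvBoundStep ([], 0) = pvB1 p p.length := by
  rw [PySem.List.enumerate_eq_map_pyRange (d := 0), List.foldl_map]
  rfl

-- ===== VERDICT (by name: the statement is the Claim_ definition above) =====
theorem get_splits_spec : Claim_equal_get_splits := by
  intro p _
  unfold Spec_get_splits get_splits get_splits_alt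
  rw [pvB1_eq]
  exact (pvInv p p.length (le_refl _)).2.1
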